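-- pv_equiv track=rewrite | github.com/Dmitrii-Des/EGE | Shpora/Task-25/Task-25-17686.py | f
-- ===== SOURCE A (Python) =====
-- from math import isqrt
--
-- def f(num):
--     res = set()
--     for i in range(2, isqrt(num) + 1):
--         if num % i == 0:
--             res |= {i, num // i}
--     res = sorted(res)
--     for i in res:
--         if i % 10 == 7 and i != 7:
--             return i
--     return 0
-- ===== SOURCE B (Python) =====
-- from math import isqrt
--
-- def f(num):
--     r = isqrt(num)
--     for d in range(17, r + 1, 10):
--         if num % d == 0:
--             return d
--     for e in range(r, 1, -1):
--         if num % e == 0: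
--             d = num // e
--             if d % 10 == 7 and d != 7:
--                 return d
--     return 0
-- ===== Notes on version B (the rewrite author's own statement) =====
-- stated objective: alternative
-- what changed: B drops A's divisor set and its sort entirely: it scans candidates that end in the digit seven in ascending order up to isqrt(num), and failing that scans cofactors downward from isqrt(num) returning num//e at the first qualifying hit, so the first hit of either scan is already the least qualifying divisor.
import Mathlib
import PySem

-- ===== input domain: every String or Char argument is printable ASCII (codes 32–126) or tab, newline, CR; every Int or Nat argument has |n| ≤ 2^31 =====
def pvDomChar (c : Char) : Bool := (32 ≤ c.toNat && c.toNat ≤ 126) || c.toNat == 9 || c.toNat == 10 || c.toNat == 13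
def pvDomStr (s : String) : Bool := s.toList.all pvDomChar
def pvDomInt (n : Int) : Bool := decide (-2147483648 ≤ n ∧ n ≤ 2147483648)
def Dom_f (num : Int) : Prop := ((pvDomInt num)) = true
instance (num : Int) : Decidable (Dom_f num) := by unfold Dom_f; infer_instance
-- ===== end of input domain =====

-- B replaces A's sqrt-bounded divisor-pair set + sort + scan by two direct scans: ascending over
-- candidates ending in the digit seven up to isqrt(num), then descending over cofactors (objective: alternative).


-- ===== PORT A =====
-- A's second 'for' loop with its in-loop 'return' (first match, else the final 'return 0')
def fScan : List Int → Int
  | [] => 0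
  | i :: t => if PySem.Int.mod i 10 == 7 && i != 7 then i else fScan t

-- 'isqrt(num)' is ported as Int.sqrt, exact for num ≥ 0; Pre_f excludes num < 0 where Python raises ValueError
def f (num : Int) : Int :=
  let res : PySem.Set Int :=
    (PySem.List.pyRange 2 (Int.sqrt num + 1) 1).foldl
      (fun s i =>
        if PySem.Int.mod num i == 0 then
          PySem.Set.union s (PySem.Set.ofList [i, PySem.Int.floordiv num i])
        else s)
      PySem.Set.empty
  fScan (PySem.List.sorted res (fun x => x) false)

-- ===== PORT B =====
-- B's first 'for' loop (ascending candidates ending in 7, up to isqrt) with its in-loop 'return'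
def fAltLoop1 (num : Int) : List Int → Option Int
  | [] => none
  | d :: t => if PySem.Int.mod num d == 0 then some d else fAltLoop1 num t

-- B's second 'for' loop (descending cofactor scan) with its in-loop 'return'
def fAltLoop2 (num : Int) : List Int → Option Int
  | [] => none
  | e :: t =>
    if PySem.Int.mod num e == 0 then
      let d := PySem.Int.floordiv num e
      if PySem.Int.mod d 10 == 7 && d != 7 then some d else fAltLoop2 num t
    else fAltLoop2 num t

-- 'isqrt(num)' is ported as Int.sqrt, exact for num ≥ 0; Pre_f excludes num < 0 where Python raises ValueError
def f_alt (num : Int) : Int :=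
  let r := Int.sqrt num
  match fAltLoop1 num (PySem.List.pyRange 17 (r + 1) 10) with
  | some d => d
  | none =>
    match fAltLoop2 num (PySem.List.pyRange r 1 (-1)) with
    | some d => d
    | none => 0

-- ===== PRECONDITION & SPEC =====
-- Pre_ excludes num < 0, where both A and B raise ValueError (math.isqrt of a negative argument)
def Pre_f (num : Int) : Prop := 0 ≤ num
instance (num : Int) : Decidable (Pre_f num) := by unfold Pre_f; infer_instance
def pvWitness_f : Int := 34

def Spec_f (num : Int) (out : Int) : Prop := out = f_alt num
instance (num : Int) (out : Int) : Decidable (Spec_f num out) := by unfold Spec_f; infer_instance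

-- ===== CLAIM (what is proved, stated in full; the proofs are below) =====
def Claim_equal_f : Prop := ∀ (num : Int), Dom_f num → Pre_f num → Spec_f num (f num)

-- ===== LEMMAS AND PROOFS =====

-- the common description of both programs' answer set: divisors of num, ending in 7, other than 7 and num
def pvT (num x : Int) : Prop := x ∣ num ∧ 17 ≤ x ∧ x < num ∧ x % 10 = 7

-- generic "first element satisfying p" (the early 'return' of a scan), as an Option
def pvFind (p : Int → Bool) : List Int → Option Int
  | [] => none
  | a :: t => if p a then some a else pvFind p t

theorem fScan_eq_pvFind (L : List Int) :
    fScan L = (pvFind (fun i => PySem.Int.mod i 10 == 7 && i != 7) L).getD 0 := by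
  induction L with
  | nil => rfl
  | cons a t ih =>
    show (if PySem.Int.mod a 10 == 7 && a != 7 then a else fScan t)
       = ((if PySem.Int.mod a 10 == 7 && a != 7 then some a else pvFind _ t).getD 0)
    by_cases h : (PySem.Int.mod a 10 == 7 && a != 7) = true
    · rw [if_pos h, if_pos h]; rfl
    · rw [if_neg h, if_neg h]; exact ih

theorem fAltLoop1_eq_pvFind (num : Int) (L : List Int) :
    fAltLoop1 num L = pvFind (fun d => PySem.Int.mod num d == 0) L := by
  induction L with
  | nil => rfl
  | cons a t ih =>
    show (if PySem.Int.mod num a == 0 then some a else fAltLoop1 num t)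
       = (if PySem.Int.mod num a == 0 then some a else pvFind _ t)
    rw [ih]

theorem fAltLoop2_eq_pvFind (num : Int) (L : List Int) :
    fAltLoop2 num L =
      (pvFind (fun e => PySem.Int.mod num e == 0 &&
          (PySem.Int.mod (PySem.Int.floordiv num e) 10 == 7 && PySem.Int.floordiv num e != 7)) L).map
        (fun e => PySem.Int.floordiv num e) := by
  induction L with
  | nil => rfl
  | cons a t ih =>
    show (if PySem.Int.mod num a == 0 then
            if PySem.Int.mod (PySem.Int.floordiv num a) 10 == 7 && PySem.Int.floordiv num a != 7 then
              some (PySem.Int.floordiv num a)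
            else fAltLoop2 num t
          else fAltLoop2 num t) = _
    by_cases h1 : (PySem.Int.mod num a == 0) = true
    · by_cases h2 : (PySem.Int.mod (PySem.Int.floordiv num a) 10 == 7 && PySem.Int.floordiv num a != 7) = true
      · rw [if_pos h1, if_pos h2]
        show _ = (pvFind _ (a :: t)).map _
        rw [show pvFind (fun e => PySem.Int.mod num e == 0 &&
              (PySem.Int.mod (PySem.Int.floordiv num e) 10 == 7 && PySem.Int.floordiv num e != 7)) (a :: t)
            = some a from by
          show (if _ then some a else _) = some a
          rw [if_pos (by
            show (PySem.Int.mod num a == 0 &&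
              (PySem.Int.mod (PySem.Int.floordiv num a) 10 == 7 && PySem.Int.floordiv num a != 7)) = true
            rw [h1, h2]; rfl)]]
        rfl
      · rw [if_pos h1, if_neg h2, ih]
        congr 1
        show _ = (if _ then some a else pvFind _ t)
        rw [if_neg (by simp only [Bool.and_eq_true] at *; tauto)]
    · rw [if_neg h1, ih]
      congr 1
      show _ = (if _ then some a else pvFind _ t)
      rw [if_neg (by simp only [Bool.and_eq_true] at *; tauto)]

theorem pvFind_eq_none (p : Int → Bool) (L : List Int) (h : ∀ x ∈ L, p x = false) :
    pvFind p L = none := by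
  induction L with
  | nil => rfl
  | cons a t ih =>
    show (if p a then some a else pvFind p t) = none
    rw [if_neg (by simp [h a (by simp)])]
    exact ih fun x hx => h x (by simp [hx])

-- on a strictly increasing list with at least one match, pvFind returns the LEAST match
theorem pvFind_spec (p : Int → Bool) (L : List Int) (hL : L.Pairwise (· < ·))
    (x : Int) (hx : x ∈ L) (hp : p x = true) :
    ∃ m, pvFind p L = some m ∧ m ∈ L ∧ p m = true ∧ ∀ y ∈ L, p y = true → m ≤ y := by
  induction L with
  | nil => cases hx
  | cons a t ih =>
    rcases List.pairwise_cons.mp hL with ⟨hlt, hpt⟩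
    by_cases hpa : p a = true
    · refine ⟨a, by show (if p a then some a else _) = some a; rw [if_pos hpa],
        List.mem_cons_self, hpa, ?_⟩
      intro y hy hqy
      rcases List.mem_cons.mp hy with rfl | h
      · exact le_refl _
      · exact le_of_lt (hlt y h)
    · have hxt : x ∈ t := by
        rcases List.mem_cons.mp hx with rfl | h
        · exact absurd hp hpa
        · exact h
      obtain ⟨m, m0, m1, m2, m3⟩ := ih hpt hxt
      refine ⟨m, by show (if p a then some a else pvFind p t) = some m; rw [if_neg hpa]; exact m0,
        List.mem_cons_of_mem _ m1, m2, ?_⟩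
      intro y hy hqy
      rcases List.mem_cons.mp hy with rfl | h
      · exact absurd hqy hpa
      · exact m3 y h hqy

-- on a strictly decreasing list with at least one match, pvFind returns the GREATEST match
theorem pvFind_spec_desc (p : Int → Bool) (L : List Int) (hL : L.Pairwise (· > ·))
    (x : Int) (hx : x ∈ L) (hp : p x = true) :
    ∃ m, pvFind p L = some m ∧ m ∈ L ∧ p m = true ∧ ∀ y ∈ L, p y = true → y ≤ m := by
  induction L with
  | nil => cases hx
  | cons a t ih =>
    rcases List.pairwise_cons.mp hL with ⟨hgt, hpt⟩
    by_cases hpa : p a = true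
    · refine ⟨a, by show (if p a then some a else _) = some a; rw [if_pos hpa],
        List.mem_cons_self, hpa, ?_⟩
      intro y hy hqy
      rcases List.mem_cons.mp hy with rfl | h
      · exact le_refl _
      · exact le_of_lt (hgt y h)
    · have hxt : x ∈ t := by
        rcases List.mem_cons.mp hx with rfl | h
        · exact absurd hp hpa
        · exact h
      obtain ⟨m, m0, m1, m2, m3⟩ := ih hpt hxt
      refine ⟨m, by show (if p a then some a else pvFind p t) = some m; rw [if_neg hpa]; exact m0,
        List.mem_cons_of_mem _ m1, m2, ?_⟩
      intro y hy hqy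
      rcases List.mem_cons.mp hy with rfl | h
      · exact absurd hqy hpa
      · exact m3 y h hqy

-- membership in A's set-building fold
theorem mem_resFold (num : Int) (l : List Int) (s0 : PySem.Set Int) (x : Int) :
    (x ∈ l.foldl (fun s i =>
        if PySem.Int.mod num i == 0 then
          PySem.Set.union s (PySem.Set.ofList [i, PySem.Int.floordiv num i])
        else s) s0) ↔
    x ∈ s0 ∨ ∃ i ∈ l, PySem.Int.mod num i = 0 ∧ (x = i ∨ x = PySem.Int.floordiv num i) := by
  induction l generalizing s0 with
  | nil => simp
  | cons a t ih =>
    simp only [List.foldl_cons]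
    by_cases ha : PySem.Int.mod num a = 0
    · rw [if_pos (by simpa using ha), ih]
      simp only [PySem.Set.mem_union, PySem.Set.mem_ofList, List.mem_cons,
        List.not_mem_nil, or_false]
      constructor
      · rintro ((h | h | h) | ⟨i, hi, h1, h2⟩)
        · exact Or.inl h
        · exact Or.inr ⟨a, Or.inl rfl, ha, Or.inl h⟩
        · exact Or.inr ⟨a, Or.inl rfl, ha, Or.inr h⟩
        · exact Or.inr ⟨i, Or.inr hi, h1, h2⟩
      · rintro (h | ⟨i, hi | hi, h1, h2⟩)
        · exact Or.inl (Or.inl h)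
        · subst hi; exact Or.inl (Or.inr h2)
        · exact Or.inr ⟨i, hi, h1, h2⟩
    · rw [if_neg (by simpa using ha), ih]
      constructor
      · rintro (h | ⟨i, hi, h1, h2⟩)
        · exact Or.inl h
        · exact Or.inr ⟨i, List.mem_cons_of_mem _ hi, h1, h2⟩
      · rintro (h | ⟨i, hi, h1, h2⟩)
        · exact Or.inl h
        · rcases List.mem_cons.mp hi with rfl | hit
          · exact absurd h1 ha
          · exact Or.inr ⟨i, hit, h1, h2⟩

theorem nodup_resFold (num : Int) (l : List Int) (s0 : PySem.Set Int) (h : s0.Nodup) :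
    (l.foldl (fun s i =>
        if PySem.Int.mod num i == 0 then
          PySem.Set.union s (PySem.Set.ofList [i, PySem.Int.floordiv num i])
        else s) s0).Nodup := by
  induction l generalizing s0 with
  | nil => exact h
  | cons a t ih =>
    simp only [List.foldl_cons]
    split
    · exact ih _ (PySem.Set.nodup_union _ _ h)
    · exact ih _ h

-- i ≤ isqrt num ↔ i*i ≤ num  (for 0 ≤ i, 0 ≤ num)
theorem le_sqrt_iff (i num : Int) (hi : 0 ≤ i) (hn : 0 ≤ num) :
    i ≤ Int.sqrt num ↔ i * i ≤ num := by
  obtain ⟨m, rfl⟩ := Int.eq_ofNat_of_zero_le hi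
  obtain ⟨n, rfl⟩ := Int.eq_ofNat_of_zero_le hn
  unfold Int.sqrt
  rw [Int.toNat_natCast, ← Nat.cast_mul, Nat.cast_le, Nat.cast_le]
  exact Nat.le_sqrt

theorem sqrt_bounds (num : Int) (hn : 0 ≤ num) :
    Int.sqrt num * Int.sqrt num ≤ num ∧ num < (Int.sqrt num + 1) * (Int.sqrt num + 1) := by
  constructor
  · exact (le_sqrt_iff (Int.sqrt num) num (Int.sqrt_nonneg num) hn).mp (le_refl _)
  · by_contra h
    push Not at h
    have := (le_sqrt_iff (Int.sqrt num + 1) num (by have := Int.sqrt_nonneg num; omega) hn).mpr h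
    omega

-- A's set contains exactly the divisors d of num with 2 ≤ d < num
theorem mem_res_iff (num x : Int) (h0 : 0 ≤ num) :
    (x ∈ (PySem.List.pyRange 2 (Int.sqrt num + 1) 1).foldl (fun s i =>
        if PySem.Int.mod num i == 0 then
          PySem.Set.union s (PySem.Set.ofList [i, PySem.Int.floordiv num i])
        else s) PySem.Set.empty) ↔
    (x ∣ num ∧ 2 ≤ x ∧ x < num) := by
  rw [mem_resFold]
  simp only [PySem.Set.empty, List.not_mem_nil, false_or]
  constructor
  · rintro ⟨i, hi, hmod, hx⟩
    rw [PySem.List.mem_pyRange_one] at hi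
    have hdvd : i ∣ num := (PySem.Int.mod_eq_zero_iff_dvd num i).mp hmod
    have hii : i * i ≤ num := (le_sqrt_iff i num (by omega) h0).mp (by omega)
    have hipos : (0:Int) < i := by omega
    have hi2 : (2:Int) ≤ i := hi.1
    have hinum : i < num := by nlinarith
    rcases hx with rfl | rfl
    · exact ⟨hdvd, hi2, hinum⟩
    · rw [PySem.Int.floordiv_eq_ediv_of_pos hipos]
      obtain ⟨q, hq⟩ := hdvd
      have hqe : num / i = q := by rw [hq]; exact Int.mul_ediv_cancel_left q (by omega)
      rw [hqe]
      have hq2 : i ≤ q := by nlinarith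
      refine ⟨⟨i, by rw [hq]; ring⟩, by omega, by nlinarith⟩
  · rintro ⟨hdvd, h2, hlt⟩
    obtain ⟨k, hk⟩ := hdvd
    have hkpos : (0:Int) < k := by nlinarith
    have hk1 : k ≠ 1 := by intro h; rw [h, mul_one] at hk; omega
    have hk2 : (2:Int) ≤ k := by omega
    by_cases hxx : x * x ≤ num
    · refine ⟨x, ?_, ?_, Or.inl rfl⟩
      · rw [PySem.List.mem_pyRange_one]
        have := (le_sqrt_iff x num (by omega) h0).mpr hxx
        omega
      · exact (PySem.Int.mod_eq_zero_iff_dvd num x).mpr ⟨k, hk⟩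
    · push Not at hxx
      have hkx : k < x := by nlinarith
      refine ⟨k, ?_, ?_, Or.inr ?_⟩
      · rw [PySem.List.mem_pyRange_one]
        have hkk : k * k ≤ num := by nlinarith
        have := (le_sqrt_iff k num (by omega) h0).mpr hkk
        omega
      · exact (PySem.Int.mod_eq_zero_iff_dvd num k).mpr ⟨x, by rw [hk]; ring⟩
      · rw [PySem.Int.floordiv_eq_ediv_of_pos (by omega)]
        rw [hk, mul_comm]
        exact (Int.mul_ediv_cancel_left x (by omega)).symm

theorem pairwise_pyRange10 (a b : Int) :
    (PySem.List.pyRange a b 10).Pairwise (· < ·) := by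
  rw [PySem.List.pyRange_of_pos a b (by norm_num)]
  rw [List.pairwise_map]
  exact (List.pairwise_lt_range).imp (by intro k k' h; omega)

theorem pairwise_pyRange_down (a b : Int) :
    (PySem.List.pyRange a b (-1)).Pairwise (· > ·) := by
  rw [PySem.List.pyRange_neg_one a b]
  rw [List.pairwise_map]
  exact (List.pairwise_lt_range).imp (by intro k k' h; omega)

-- any hit of B's first loop is in pvT
theorem phase1_hit_T (num d : Int) (h0 : 0 ≤ num)
    (hd : d ∈ PySem.List.pyRange 17 (Int.sqrt num + 1) 10)
    (hp : (PySem.Int.mod num d == 0) = true) : pvT num d := by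
  rw [PySem.List.mem_pyRange_iff_of_pos (by norm_num)] at hd
  obtain ⟨h17, hlt, hstep⟩ := hd
  have hdvd : d ∣ num := (PySem.Int.mod_eq_zero_iff_dvd num d).mp (by simpa using hp)
  have hdd : d * d ≤ num := (le_sqrt_iff d num (by omega) h0).mp (by omega)
  exact ⟨hdvd, by omega, by nlinarith, by omega⟩

-- any hit of B's second loop yields a pvT element
theorem phase2_hit_T (num e : Int) (h0 : 0 ≤ num)
    (he : e ∈ PySem.List.pyRange (Int.sqrt num) 1 (-1))
    (hp : (PySem.Int.mod num e == 0 &&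
        (PySem.Int.mod (PySem.Int.floordiv num e) 10 == 7 && PySem.Int.floordiv num e != 7)) = true) :
    pvT num (PySem.Int.floordiv num e) := by
  rw [PySem.List.mem_pyRange_neg_one] at he
  obtain ⟨h1, h2⟩ := he
  have hepos : (0:Int) < e := by omega
  simp only [Bool.and_eq_true, beq_iff_eq, bne_iff_ne, ne_eq] at hp
  obtain ⟨hmod, h7, hne7⟩ := hp
  have hdvd : e ∣ num := (PySem.Int.mod_eq_zero_iff_dvd num e).mp hmod
  obtain ⟨c, hc⟩ := hdvd
  have hce : PySem.Int.floordiv num e = c := by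
    rw [PySem.Int.floordiv_eq_ediv_of_pos hepos, hc]
    exact Int.mul_ediv_cancel_left c (by omega)
  rw [hce] at h7 hne7 ⊢
  rw [PySem.Int.mod_eq_emod_of_pos (by norm_num)] at h7
  have hcnn : 0 ≤ c := by nlinarith
  have hc17 : (17:Int) ≤ c := by omega
  refine ⟨⟨e, by rw [hc]; ring⟩, hc17, by nlinarith, h7⟩

-- B returns 0 when pvT is empty, and the least element of pvT otherwise
theorem falt_of_empty (num : Int) (h0 : 0 ≤ num) (h : ∀ x, ¬ pvT num x) :
    f_alt num = 0 := by
  show (match fAltLoop1 num (PySem.List.pyRange 17 (Int.sqrt num + 1) 10) with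
        | some d => d
        | none =>
          match fAltLoop2 num (PySem.List.pyRange (Int.sqrt num) 1 (-1)) with
          | some d => d
          | none => 0) = 0
  rw [fAltLoop1_eq_pvFind, fAltLoop2_eq_pvFind]
  rw [pvFind_eq_none _ _ (by
    intro d hd
    cases hpd : (PySem.Int.mod num d == 0) with
    | false => rfl
    | true => exact absurd (phase1_hit_T num d h0 hd hpd) (h d))]
  rw [pvFind_eq_none _ _ (by
    intro e he
    cases hpe : (PySem.Int.mod num e == 0 &&
        (PySem.Int.mod (PySem.Int.floordiv num e) 10 == 7 && PySem.Int.floordiv num e != 7)) with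
    | false => rfl
    | true => exact absurd (phase2_hit_T num e h0 he hpe) (h _))]
  rfl

theorem falt_of_min (num m : Int) (h0 : 0 ≤ num) (hm : pvT num m)
    (hmin : ∀ y, pvT num y → m ≤ y) : f_alt num = m := by
  obtain ⟨hdvd, h17, hltn, hm10⟩ := hm
  have hsq := sqrt_bounds num h0
  have hrnn := Int.sqrt_nonneg num
  show (match fAltLoop1 num (PySem.List.pyRange 17 (Int.sqrt num + 1) 10) with
        | some d => d
        | none =>
          match fAltLoop2 num (PySem.List.pyRange (Int.sqrt num) 1 (-1)) with
          | some d => d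
          | none => 0) = m
  rw [fAltLoop1_eq_pvFind, fAltLoop2_eq_pvFind]
  by_cases hcase : m * m ≤ num
  · -- m is found by the first loop
    have hmr : m ≤ Int.sqrt num := (le_sqrt_iff m num (by omega) h0).mpr hcase
    have hmem : m ∈ PySem.List.pyRange 17 (Int.sqrt num + 1) 10 := by
      rw [PySem.List.mem_pyRange_iff_of_pos (by norm_num)]
      refine ⟨h17, by omega, by omega⟩
    have hpm : (PySem.Int.mod num m == 0) = true := by
      simpa using (PySem.Int.mod_eq_zero_iff_dvd num m).mpr hdvd
    obtain ⟨m', e0, e1, e2, e3⟩ :=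
      pvFind_spec (fun d => PySem.Int.mod num d == 0) _
        (pairwise_pyRange10 17 (Int.sqrt num + 1)) m hmem hpm
    have hm'T := phase1_hit_T num m' h0 e1 e2
    have : m' = m := le_antisymm (e3 m hmem hpm) (hmin m' hm'T)
    rw [e0, this]
  · -- the first loop misses; the second loop finds e = num / m and returns m
    push Not at hcase
    have hnone : pvFind (fun d => PySem.Int.mod num d == 0)
        (PySem.List.pyRange 17 (Int.sqrt num + 1) 10) = none := by
      apply pvFind_eq_none
      intro d hd
      cases hpd : (PySem.Int.mod num d == 0) with
      | false => rfl
      | true =>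
        exfalso
        have hdT := phase1_hit_T num d h0 hd hpd
        have hmd := hmin d hdT
        rw [PySem.List.mem_pyRange_iff_of_pos (by norm_num)] at hd
        nlinarith
    rw [hnone]
    obtain ⟨c, hc⟩ := hdvd
    have hcpos : (0:Int) < c := by nlinarith
    have hc1 : c ≠ 1 := by intro h; rw [h, mul_one] at hc; omega
    have hc2 : (2:Int) ≤ c := by omega
    have hmr : Int.sqrt num < m := by nlinarith
    have hcr : c ≤ Int.sqrt num := by nlinarith
    have hmemc : c ∈ PySem.List.pyRange (Int.sqrt num) 1 (-1) := by
      rw [PySem.List.mem_pyRange_neg_one]; omega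
    have hfdc : PySem.Int.floordiv num c = m := by
      rw [PySem.Int.floordiv_eq_ediv_of_pos hcpos, hc, mul_comm]
      exact Int.mul_ediv_cancel_left m (by omega)
    have hpc : (PySem.Int.mod num c == 0 &&
        (PySem.Int.mod (PySem.Int.floordiv num c) 10 == 7 && PySem.Int.floordiv num c != 7)) = true := by
      rw [hfdc]
      simp only [Bool.and_eq_true, beq_iff_eq, bne_iff_ne, ne_eq]
      refine ⟨(PySem.Int.mod_eq_zero_iff_dvd num c).mpr ⟨m, by rw [hc]; ring⟩,
        by rw [PySem.Int.mod_eq_emod_of_pos (by norm_num)]; omega, by omega⟩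
    obtain ⟨e', f0, f1, f2, f3⟩ :=
      pvFind_spec_desc (fun e => PySem.Int.mod num e == 0 &&
          (PySem.Int.mod (PySem.Int.floordiv num e) 10 == 7 && PySem.Int.floordiv num e != 7)) _
        (pairwise_pyRange_down (Int.sqrt num) 1) c hmemc hpc
    have hd'T := phase2_hit_T num e' h0 f1 f2
    -- e' ≥ c forces num/e' ≤ m; minimality of m forces equality
    have hce' : c ≤ e' := f3 c hmemc hpc
    have he'pos : (0:Int) < e' := by
      rw [PySem.List.mem_pyRange_neg_one] at f1; omega
    simp only [Bool.and_eq_true, beq_iff_eq] at f2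
    obtain ⟨c', hc'⟩ := (PySem.Int.mod_eq_zero_iff_dvd num e').mp f2.1
    have hfd' : PySem.Int.floordiv num e' = c' := by
      rw [PySem.Int.floordiv_eq_ediv_of_pos he'pos, hc']
      exact Int.mul_ediv_cancel_left c' (by omega)
    have hc'le : c' ≤ m := by nlinarith [hc, hc', hce']
    have hmle : m ≤ c' := by
      have := hmin _ hd'T
      rwa [hfd'] at this
    rw [f0]
    show PySem.Int.floordiv num e' = m
    rw [hfd']; omega

-- ===== VERDICT (by name: the statement is the Claim_ definition above) =====
theorem f_spec : Claim_equal_f := by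
  intro num _ hpre
  have h0 : (0:Int) ≤ num := hpre
  show f num = f_alt num
  rw [show f num = fScan (PySem.List.sorted ((PySem.List.pyRange 2 (Int.sqrt num + 1) 1).foldl
        (fun s i =>
          if PySem.Int.mod num i == 0 then
            PySem.Set.union s (PySem.Set.ofList [i, PySem.Int.floordiv num i])
          else s) PySem.Set.empty) (fun x => x) false) from rfl]
  set res : PySem.Set Int := (PySem.List.pyRange 2 (Int.sqrt num + 1) 1).foldl
        (fun s i =>
          if PySem.Int.mod num i == 0 then
            PySem.Set.union s (PySem.Set.ofList [i, PySem.Int.floordiv num i])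
          else s) PySem.Set.empty with hres
  have hnd : res.Nodup := nodup_resFold num _ _ List.nodup_nil
  have hsortpw : (PySem.List.sorted res (fun x => x) false).Pairwise (· < ·) := by
    have := PySem.List.sorted_ofList_pairwise_lt (κ := Int) res
    rwa [PySem.Set.ofList_eq_self_of_nodup res hnd] at this
  -- elements of A's sorted list that pass A's filter = pvT
  have hTiff : ∀ x, (x ∈ PySem.List.sorted res (fun x => x) false ∧
      (PySem.Int.mod x 10 == 7 && x != 7) = true) ↔ pvT num x := by
    intro x
    rw [PySem.List.mem_sorted, hres, mem_res_iff num x h0]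
    have hmodx : PySem.Int.mod x 10 = x % 10 := PySem.Int.mod_eq_emod_of_pos (by norm_num)
    simp only [Bool.and_eq_true, beq_iff_eq, bne_iff_ne, ne_eq, hmodx]
    unfold pvT
    constructor
    · rintro ⟨⟨hdvd, h2, hlt⟩, h7, hne⟩
      exact ⟨hdvd, by omega, hlt, h7⟩
    · rintro ⟨hdvd, h17, hlt, h7⟩
      exact ⟨⟨hdvd, by omega, hlt⟩, h7, by omega⟩
  rw [fScan_eq_pvFind]
  by_cases hex : ∃ x ∈ PySem.List.sorted res (fun x => x) false,
      (PySem.Int.mod x 10 == 7 && x != 7) = true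
  · obtain ⟨x, hx, hp⟩ := hex
    obtain ⟨m, e0, e1, e2, e3⟩ :=
      pvFind_spec (fun i => PySem.Int.mod i 10 == 7 && i != 7) _ hsortpw x hx hp
    have hTm : pvT num m := (hTiff m).mp ⟨e1, e2⟩
    have hminT : ∀ y, pvT num y → m ≤ y := by
      intro y hy
      obtain ⟨hy1, hy2⟩ := (hTiff y).mpr hy
      exact e3 y hy1 hy2
    rw [e0]
    exact (falt_of_min num m h0 hTm hminT).symm
  · push Not at hex
    rw [pvFind_eq_none _ _ (by
      intro y hy
      cases hpy : (PySem.Int.mod y 10 == 7 && y != 7) with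
      | false => rfl
      | true => exact absurd hpy (hex y hy))]
    exact (falt_of_empty num h0 (by
      intro y hy
      obtain ⟨hy1, hy2⟩ := (hTiff y).mpr hy
      exact hex y hy1 hy2)).symm
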